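-- pv_equiv track=rewrite | github.com/LuisPalominoTrevilla/CompetitiveProgramming | Competition1/boardNumber.py | getSmallestDifferNum
-- ===== SOURCE A (Python) =====
-- def getSmallestDifferNum(n, k):
--     res = 0
--     visited = {}
--     for i in range(len(n)):
--         num = int(n[i])
--         if visited.get(num):
--             visited[num] += 1
--         else:
--             visited[num] = 1
--         res += num
--         if res >= k:
--             return 0
--     acum = 0
--     num_digit = 0
--     for i in range(10):
--         if visited.get(i):
--             j = 0
--             while(j < visited.get(i)):
--                 acum += 9-i
--                 num_digit += 1
--                 if acum + res >= k:
--                     return num_digit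
--                 j+=1
--     return num_digit
-- ===== SOURCE B (Python) =====
-- def getSmallestDifferNum(n, k):
--     digits = [int(c) for c in n]
--     res = sum(digits)
--     if res >= k:
--         return 0
--     deficit = k - res
--     taken = 0
--     for v in range(9):
--         cnt = digits.count(v)
--         gain = 9 - v
--         if deficit <= cnt * gain:
--             return taken + (deficit + gain - 1) // gain
--         taken += cnt
--         deficit -= cnt * gain
--     return len(digits)
-- ===== Notes on version B (the rewrite author's own statement) =====
-- stated objective: alternative
-- what changed: Replaces A's dict of digit counts plus nested per-digit while loop (adding one digit at a time) by a closed-form pass over the nine digit values: each value's multiplicity comes from list.count and the number of digits needed inside the deciding value class is computed at once by ceiling division, so no per-digit greedy iteration remains.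
-- outside the precondition, e.g. on getSmallestDifferNum('5x', 3): A returns 0, B raises ValueError
import Mathlib
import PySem

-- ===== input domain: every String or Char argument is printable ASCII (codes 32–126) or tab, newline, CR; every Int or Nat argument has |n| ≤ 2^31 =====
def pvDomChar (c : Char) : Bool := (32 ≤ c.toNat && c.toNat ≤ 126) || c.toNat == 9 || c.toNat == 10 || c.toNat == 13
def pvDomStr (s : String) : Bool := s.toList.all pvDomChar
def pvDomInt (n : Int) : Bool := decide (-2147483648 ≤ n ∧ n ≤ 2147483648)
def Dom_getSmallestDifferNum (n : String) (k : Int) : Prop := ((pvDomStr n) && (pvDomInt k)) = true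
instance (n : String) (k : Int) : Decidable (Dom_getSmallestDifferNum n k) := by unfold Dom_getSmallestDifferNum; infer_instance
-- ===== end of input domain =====

-- B: one pass over the nine digit VALUES with list.count and a ceiling division inside the
-- deciding value class replaces A's dict of counts and nested per-digit while loop.


-- ===== PORT A =====
-- int(n[i]) for a single character (exact: PySem.Int.ofChars?)
def pvDigit? (c : Char) : Option Int := PySem.Int.ofChars? [c]

-- the body of A's first loop acting on `visited`
def pvVisit (vis : PySem.Dict Int Int) (num : Int) : PySem.Dict Int Int :=
  match vis.get? num with
  | some v => if v ≠ 0 then vis.insert num (v + 1) else vis.insert num 1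
  | none => vis.insert num 1

-- A's first loop: none on ValueError, .inl 0 on the early `return 0`,
-- .inr (res, visited) on fall-through
def pvLoop1 (k : Int) : List Char → Int → PySem.Dict Int Int →
    Option (Sum Int (Int × PySem.Dict Int Int))
  | [], res, vis => some (.inr (res, vis))
  | c :: cs, res, vis =>
    match pvDigit? c with
    | none => none
    | some num =>
      let vis' := pvVisit vis num
      let res' := res + num
      if res' ≥ k then some (.inl 0) else pvLoop1 k cs res' vis'

-- A's inner `while j < visited.get(i)` loop; fuel = number of remaining iterations
def pvInner (i res k : Int) : Nat → Int → Int → Sum Int (Int × Int)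
  | 0, acum, nd => .inr (acum, nd)
  | f + 1, acum, nd =>
    let acum' := acum + (9 - i)
    let nd' := nd + 1
    if acum' + res ≥ k then .inl nd' else pvInner i res k f acum' nd'

-- A's second loop `for i in range(10)`
def pvLoop2 (vis : PySem.Dict Int Int) (res k : Int) : List Int → Int → Int → Int
  | [], _, nd => nd
  | i :: is, acum, nd =>
    match vis.get? i with
    | some v =>
      if v ≠ 0 then
        match pvInner i res k v.toNat acum nd with
        | .inl r => r
        | .inr (acum', nd') => pvLoop2 vis res k is acum' nd'
      else pvLoop2 vis res k is acum nd
    | none => pvLoop2 vis res k is acum nd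

def getSmallestDifferNum (n : String) (k : Int) : Int :=
  match pvLoop1 k n.toList 0 PySem.Dict.empty with
  | none => 0   -- ValueError: outside Pre_
  | some (.inl r) => r
  | some (.inr (res, vis)) => pvLoop2 vis res k (PySem.List.pyRange 0 10 1) 0 0

-- ===== PORT B =====
-- [int(c) for c in n]
def pvDigits? : List Char → Option (List Int)
  | [] => some []
  | c :: cs =>
    match PySem.Int.ofChars? [c], pvDigits? cs with
    | some d, some ds => some (d :: ds)
    | _, _ => none

-- B's `for v in range(9)` loop over the digit VALUES; state = (deficit, taken)
def pvBLoop (ds : List Int) : List Int → Int → Int → Int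
  | [], _, _ => (ds.length : Int)
  | v :: vs, deficit, taken =>
    let cnt : Int := (PySem.List.count ds v : Int)
    let gain := 9 - v
    if deficit ≤ cnt * gain then taken + PySem.Int.floordiv (deficit + gain - 1) gain
    else pvBLoop ds vs (deficit - cnt * gain) (taken + cnt)

def getSmallestDifferNum_alt (n : String) (k : Int) : Int :=
  match pvDigits? n.toList with
  | none => 0   -- ValueError: outside Pre_
  | some ds =>
    let res := ds.sum
    if res ≥ k then 0
    else pvBLoop ds (PySem.List.pyRange 0 9 1) (k - res) 0

-- ===== PRECONDITION & SPEC =====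
-- Pre_ excludes strings containing a non-digit character: there A raises ValueError, except
-- when an all-digit prefix already reaches k so A's early `return 0` fires before the bad
-- character is read — B raises ValueError on every such string.
def Pre_getSmallestDifferNum (n : String) (k : Int) : Prop :=
  (n.toList.all fun c => 48 ≤ c.toNat && c.toNat ≤ 57) = true
instance (n : String) (k : Int) : Decidable (Pre_getSmallestDifferNum n k) := by
  unfold Pre_getSmallestDifferNum; infer_instance

def pvWitness_getSmallestDifferNum : String × Int := ("26", 15)

def Spec_getSmallestDifferNum (n : String) (k : Int) (out : Int) : Prop :=
  out = getSmallestDifferNum_alt n k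
instance (n : String) (k : Int) (out : Int) : Decidable (Spec_getSmallestDifferNum n k out) := by
  unfold Spec_getSmallestDifferNum; infer_instance

-- ===== CLAIM (what is proved, stated in full; the proofs are below) =====
def Claim_equal_getSmallestDifferNum : Prop :=
  ∀ (n : String) (k : Int), Dom_getSmallestDifferNum n k → Pre_getSmallestDifferNum n k →
    Spec_getSmallestDifferNum n k (getSmallestDifferNum n k)

-- ===== LEMMAS AND PROOFS =====

theorem char_digit_mem (c : Char) (h1 : 48 ≤ c.toNat) (h2 : c.toNat ≤ 57) :
    c ∈ ['0','1','2','3','4','5','6','7','8','9'] := by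
  have h := Char.ofNat_toNat c
  interval_cases hn : c.toNat <;> rw [← h] <;> decide

theorem ofChars_digit (c : Char) (h1 : 48 ≤ c.toNat) (h2 : c.toNat ≤ 57) :
    PySem.Int.ofChars? [c] = some ((c.toNat : Int) - 48) := by
  have := char_digit_mem c h1 h2
  fin_cases this <;> decide

theorem pvDigits?_eq (cs : List Char) (h : ∀ c ∈ cs, 48 ≤ c.toNat ∧ c.toNat ≤ 57) :
    pvDigits? cs = some (cs.map fun c => ((c.toNat : Int) - 48)) := by
  induction cs with
  | nil => rfl
  | cons c cs ih =>
    have hc := h c (by simp)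
    simp only [pvDigits?, List.map, ofChars_digit c hc.1 hc.2,
      ih (fun x hx => h x (List.mem_cons_of_mem _ hx))]

-- the digit scan A's second phase reduces to: early `.inl count`, else final (acum, count)
def escan (res k : Int) : List Int → Int → Int → Sum Int (Int × Int)
  | [], a, c => .inr (a, c)
  | d :: t, a, c =>
    let a' := a + (9 - d)
    let c' := c + 1
    if a' + res ≥ k then .inl c' else escan res k t a' c'

theorem escan_append (res k : Int) (xs ys : List Int) (a c : Int) :
    escan res k (xs ++ ys) a c =
      match escan res k xs a c with
      | .inl r => .inl r
      | .inr (a', c') => escan res k ys a' c' := by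
  induction xs generalizing a c with
  | nil => rfl
  | cons d t ih =>
    simp only [List.cons_append, escan]
    split_ifs with h
    · rfl
    · exact ih _ _

theorem pvInner_eq (i res k : Int) (f : Nat) (a c : Int) :
    pvInner i res k f a c = escan res k (List.replicate f i) a c := by
  induction f generalizing a c with
  | zero => rfl
  | succ f ih =>
    simp only [pvInner, List.replicate_succ, escan]
    split_ifs with h
    · rfl
    · exact ih _ _

theorem pvLoop2_eq (vis : PySem.Dict Int Int) (res k : Int) (is : List Int) (a c : Int) :
    pvLoop2 vis res k is a c =
      match escan res k (is.flatMap fun i => List.replicate ((vis.get? i).getD 0).toNat i) a c with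
      | .inl r => r
      | .inr (_, c') => c' := by
  induction is generalizing a c with
  | nil => rfl
  | cons i is ih =>
    simp only [pvLoop2, List.flatMap_cons, escan_append]
    rcases hv : vis.get? i with _ | v
    · simpa [hv] using ih a c
    · by_cases h0 : v = 0
      · subst h0; simpa [hv] using ih a c
      · simp only [Option.getD_some, if_pos h0, pvInner_eq]
        rcases he : escan res k (List.replicate v.toNat i) a c with r | ⟨a', c'⟩
        · rfl
        · exact ih a' c'

theorem pvVisit_getD (vis : PySem.Dict Int Int) (num i : Int) :
    ((pvVisit vis num).get? i).getD 0 =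
      (vis.get? i).getD 0 + if i = num then 1 else 0 := by
  unfold pvVisit
  rcases hv : vis.get? num with _ | v
  · rw [PySem.Dict.get?_insert]
    split_ifs with h
    · subst h; simp [hv]
    · simp
  · by_cases h0 : v = 0
    · subst h0
      simp only [ne_eq, not_true_eq_false, if_false]
      rw [PySem.Dict.get?_insert]
      split_ifs with h
      · subst h; simp [hv]
      · simp
    · simp only [ne_eq, h0, not_false_eq_true, if_true]
      rw [PySem.Dict.get?_insert]
      split_ifs with h
      · subst h; simp [hv]
      · simp

theorem visFold_getD (ds : List Int) (vis : PySem.Dict Int Int) (i : Int) :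
    ((ds.foldl pvVisit vis).get? i).getD 0 = (vis.get? i).getD 0 + (ds.count i : Int) := by
  induction ds generalizing vis with
  | nil => simp
  | cons d t ih =>
    simp only [List.foldl_cons, ih, pvVisit_getD, List.count_cons]
    by_cases h : i = d
    · simp [h]; omega
    · have h' : ¬d = i := fun hh => h hh.symm
      simp [h, h']

theorem pvLoop1_early (k : Int) (cs : List Char) (res : Int) (vis : PySem.Dict Int Int)
    (h : ∀ c ∈ cs, 48 ≤ c.toNat ∧ c.toNat ≤ 57) (hne : cs ≠ [])
    (hk : k ≤ res + (cs.map fun c => ((c.toNat : Int) - 48)).sum) :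
    pvLoop1 k cs res vis = some (.inl 0) := by
  induction cs generalizing res vis with
  | nil => exact absurd rfl hne
  | cons c t ih =>
    have hc := h c (by simp)
    simp only [pvLoop1, pvDigit?, ofChars_digit c hc.1 hc.2]
    split_ifs with hge
    · rfl
    · rcases t with _ | ⟨c', t'⟩
      · exfalso
        simp only [List.map_cons, List.map_nil, List.sum_cons, List.sum_nil] at hk
        omega
      · refine ih _ _ (fun x hx => h x (List.mem_cons_of_mem _ hx)) (by simp) ?_
        simp only [List.map_cons, List.sum_cons] at hk ⊢
        omega

theorem pvLoop1_full (k : Int) (cs : List Char) (res : Int) (vis : PySem.Dict Int Int)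
    (h : ∀ c ∈ cs, 48 ≤ c.toNat ∧ c.toNat ≤ 57)
    (hk : res + (cs.map fun c => ((c.toNat : Int) - 48)).sum < k) :
    pvLoop1 k cs res vis =
      some (.inr (res + (cs.map fun c => ((c.toNat : Int) - 48)).sum,
        (cs.map fun c => ((c.toNat : Int) - 48)).foldl pvVisit vis)) := by
  induction cs generalizing res vis with
  | nil => simp [pvLoop1]
  | cons c t ih =>
    have hc := h c (by simp)
    have hrest : (0:Int) ≤ (t.map fun c => ((c.toNat : Int) - 48)).sum := by
      apply List.sum_nonneg
      intro x hx
      simp only [List.mem_map] at hx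
      obtain ⟨y, hy, rfl⟩ := hx
      have := (h y (List.mem_cons_of_mem _ hy)).1
      omega
    simp only [List.map_cons, List.sum_cons] at hk ⊢
    simp only [pvLoop1, pvDigit?, ofChars_digit c hc.1 hc.2]
    split_ifs with hge
    · omega
    · rw [ih _ _ (fun x hx => h x (List.mem_cons_of_mem _ hx)) (by omega)]
      simp only [List.foldl_cons, Option.some.injEq, Sum.inr.injEq, Prod.mk.injEq]
      constructor
      · omega
      · trivial

def R10 : List Int := [0, 1, 2, 3, 4, 5, 6, 7, 8, 9]

theorem buckets_insert (is : List Int) (d : Int) (cnt : Int → Nat)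
    (hnd : is.Nodup) (hd : d ∈ is) :
    (is.flatMap fun i => List.replicate (cnt i + if i = d then 1 else 0) i).Perm
      (d :: is.flatMap fun i => List.replicate (cnt i) i) := by
  induction is with
  | nil => simp at hd
  | cons i is ih =>
    rcases List.nodup_cons.mp hnd with ⟨hni, hnd'⟩
    simp only [List.flatMap_cons]
    by_cases hid : i = d
    · subst hid
      have hsame : (is.flatMap fun j => List.replicate (cnt j + if j = i then 1 else 0) j)
          = is.flatMap fun j => List.replicate (cnt j) j := by
        apply List.flatMap_congr
        intro j hj
        rw [if_neg (by rintro rfl; exact hni hj), Nat.add_zero]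
      rw [if_pos rfl, hsame, List.replicate_succ]
      simp
    · have hd' : d ∈ is := by
        rcases List.mem_cons.mp hd with h | h
        · exact absurd h.symm hid
        · exact h
      rw [if_neg hid]
      exact (((ih hnd' hd').append_left _).trans List.perm_middle)

theorem buckets_perm (ds : List Int) (hb : ∀ d ∈ ds, 0 ≤ d ∧ d ≤ 9) :
    (R10.flatMap fun i => List.replicate (ds.count i) i).Perm ds := by
  induction ds with
  | nil => simp [R10]
  | cons d t ih =>
    have hd : d ∈ R10 := by
      have := hb d (by simp)
      simp only [R10, List.mem_cons, List.not_mem_nil, or_false]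
      omega
    have hcnt : (fun i => List.replicate ((d :: t).count i) i)
        = fun i => List.replicate (t.count i + if i = d then 1 else 0) i := by
      funext i
      by_cases h : i = d
      · subst h; simp
      · have h' : ¬d = i := fun hh => h hh.symm
        simp [h, h']
    rw [hcnt]
    exact (buckets_insert R10 d _ (by decide) hd).trans
      ((ih (fun x hx => hb x (List.mem_cons_of_mem _ hx))).cons d)

-- escan over a run of 9s: gain 0, never returns early
theorem escan_replicate_nine (res k : Int) (m : Nat) (a c : Int) (hd : a + res < k) :
    escan res k (List.replicate m 9) a c = .inr (a, c + m) := by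
  induction m generalizing c with
  | zero => simp [escan]
  | succ m ih =>
    have ha : a + ((9 : Int) - 9) = a := by norm_num
    simp only [List.replicate_succ, escan, ha]
    rw [if_neg (by omega), ih (c + 1)]
    simp only [Sum.inr.injEq, Prod.mk.injEq]
    refine ⟨trivial, by push_cast; omega⟩

-- escan over a run of m copies of i with positive gain g = 9 - i: closed form
theorem escan_replicate_pos (i res k : Int) (m : Nat) (a c : Int)
    (hg : 0 < 9 - i) (hd : a + res < k) :
    escan res k (List.replicate m i) a c =
      if k - res - a ≤ m * (9 - i) then .inl (c + (k - res - a + (9 - i) - 1) / (9 - i))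
      else .inr (a + m * (9 - i), c + m) := by
  induction m generalizing a c with
  | zero =>
    simp only [List.replicate_zero, escan, Nat.cast_zero, zero_mul]
    rw [if_neg (by omega)]
    simp
  | succ m ih =>
    have hgne : (9 - i) ≠ 0 := by omega
    simp only [List.replicate_succ, escan]
    by_cases h1 : a + (9 - i) + res ≥ k
    · rw [if_pos h1, if_pos (by push_cast; nlinarith [Int.mul_nonneg (by positivity : (0:Int) ≤ (m:Int)) (le_of_lt hg)])]
      have hdiv : (k - res - a + (9 - i) - 1) / (9 - i) = 1 := by
        have e1 : k - res - a + (9 - i) - 1 = (k - res - a - 1) + 1 * (9 - i) := by ring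
        rw [e1, Int.add_mul_ediv_right _ _ hgne,
          Int.ediv_eq_zero_of_lt (by omega) (by omega)]
        omega
      rw [hdiv]
    · rw [if_neg h1, ih (a + (9 - i)) (c + 1) (by omega)]
      have hcond : (k - res - (a + (9 - i)) ≤ (m : Int) * (9 - i)) ↔
          (k - res - a ≤ ((m + 1 : Nat) : Int) * (9 - i)) := by
        push_cast
        constructor <;> intro h <;> nlinarith
      by_cases h2 : k - res - (a + (9 - i)) ≤ (m : Int) * (9 - i)
      · rw [if_pos h2, if_pos (hcond.mp h2)]
        have e1 : k - res - (a + (9 - i)) + (9 - i) - 1 = k - res - a - 1 := by ring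
        have e2 : k - res - a + (9 - i) - 1 = (k - res - a - 1) + 1 * (9 - i) := by ring
        rw [e1, e2, Int.add_mul_ediv_right _ _ hgne]
        congr 1
        omega
      · rw [if_neg h2, if_neg (fun hh => h2 (hcond.mpr hh))]
        simp only [Sum.inr.injEq, Prod.mk.injEq]
        constructor
        · push_cast; ring
        · push_cast; omega

-- B's value-class loop equals the digit scan over the corresponding bucket runs (plus the 9s)
theorem pvBLoop_eq (ds : List Int) (k : Int) (vs : List Int) (a c : Int)
    (hvs : ∀ v ∈ vs, 0 ≤ v ∧ v ≤ 8)
    (hd : a + ds.sum < k)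
    (hlen : c + (((vs.flatMap fun v => List.replicate (ds.count v) v).length : Int)
        + (ds.count 9 : Int)) = (ds.length : Int)) :
    pvBLoop ds vs (k - ds.sum - a) c =
      match escan ds.sum k ((vs.flatMap fun v => List.replicate (ds.count v) v)
          ++ List.replicate (ds.count 9) 9) a c with
      | .inl r => r
      | .inr (_, c') => c' := by
  induction vs generalizing a c with
  | nil =>
    simp only [List.flatMap_nil, List.length_nil, Nat.cast_zero, zero_add] at hlen
    simp only [List.flatMap_nil, List.nil_append, escan_replicate_nine ds.sum k _ a c hd,
      pvBLoop]
    show (ds.length : Int) = c + ((ds.count 9 : Nat) : Int)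
    omega
  | cons v vs ih =>
    have hv := hvs v (by simp)
    have hg : (0:Int) < 9 - v := by omega
    simp only [pvBLoop, PySem.List.count_eq, List.flatMap_cons, List.append_assoc,
      escan_append, escan_replicate_pos v ds.sum k (ds.count v) a c hg hd]
    by_cases h1 : k - ds.sum - a ≤ (ds.count v : Int) * (9 - v)
    · rw [if_pos (by exact_mod_cast h1), if_pos (by exact_mod_cast h1)]
      rw [PySem.Int.floordiv_eq_ediv_of_pos hg]
    · rw [if_neg (by exact_mod_cast h1), if_neg (by exact_mod_cast h1)]
      have harg : k - ds.sum - a - (ds.count v : Int) * (9 - v)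
          = k - ds.sum - (a + (ds.count v : Int) * (9 - v)) := by ring
      rw [harg, ih (a + (ds.count v : Int) * (9 - v)) (c + (ds.count v : Int))
        (fun x hx => hvs x (List.mem_cons_of_mem _ hx)) (by omega) (by
          simp only [List.flatMap_cons, List.length_append, List.length_replicate] at hlen
          push_cast at hlen ⊢
          omega), escan_append]

theorem flatMap_R10_split (f : Int → List Int) :
    R10.flatMap f = ([0,1,2,3,4,5,6,7,8] : List Int).flatMap f ++ f 9 := by
  simp [R10]

theorem length_buckets (ds : List Int) (hb : ∀ d ∈ ds, 0 ≤ d ∧ d ≤ 9) :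
    (R10.flatMap fun i => List.replicate (ds.count i) i).length = ds.length :=
  (buckets_perm ds hb).length_eq

theorem pyRange_ten : PySem.List.pyRange 0 10 1 = R10 := by decide

theorem pyRange_nine : PySem.List.pyRange 0 9 1 = ([0,1,2,3,4,5,6,7,8] : List Int) := by decide

-- ===== VERDICT (by name: the statement is the Claim_ definition above) =====
theorem getSmallestDifferNum_spec : Claim_equal_getSmallestDifferNum := by
  intro n k _ hpre
  unfold Spec_getSmallestDifferNum getSmallestDifferNum getSmallestDifferNum_alt
  have hpre' : ∀ c ∈ n.toList, 48 ≤ c.toNat ∧ c.toNat ≤ 57 := by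
    intro c hc
    simpa using List.all_eq_true.mp hpre c hc
  rw [pvDigits?_eq n.toList hpre']
  set ds := n.toList.map fun c => ((c.toNat : Int) - 48) with hds
  have hb : ∀ d ∈ ds, 0 ≤ d ∧ d ≤ 9 := by
    intro d hd
    rw [hds] at hd
    obtain ⟨c, hc, rfl⟩ := List.mem_map.mp hd
    have := hpre' c hc
    omega
  by_cases hk : ds.sum ≥ k
  · -- B returns 0; A's first loop returns 0 early (or, on "", the second loop returns 0)
    rcases hcs : n.toList with _ | ⟨c, cs'⟩
    · have hds0 : ds = [] := by rw [hds, hcs]; rfl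
      simp only [pvLoop1, pyRange_ten, hds0]
      rw [pvLoop2_eq]
      rw [hds0] at hk
      simp only [List.sum_nil] at hk
      simp [PySem.Dict.get?_empty, R10, escan, if_pos hk]
    · have h1 : ∀ x ∈ c :: cs', 48 ≤ x.toNat ∧ x.toNat ≤ 57 := by
        rw [← hcs]; exact hpre'
      have h2 : k ≤ 0 + ((c :: cs').map fun c => ((c.toNat : Int) - 48)).sum := by
        rw [← hcs, ← hds]; omega
      rw [pvLoop1_early k (c :: cs') 0 PySem.Dict.empty h1 (by simp) h2]
      simp [hk]
  · -- no early return: A's bucket walk = B's closed-form pass over the value classes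
    rw [not_le] at hk
    rw [pvLoop1_full k n.toList 0 PySem.Dict.empty hpre' (by rw [← hds] at *; omega)]
    simp only [← hds, zero_add, if_neg (by omega : ¬ ds.sum ≥ k)]
    rw [pvLoop2_eq, pyRange_ten, pyRange_nine]
    have hcntf : (fun i => List.replicate (((ds.foldl pvVisit PySem.Dict.empty).get? i).getD 0).toNat i)
        = fun i => List.replicate (ds.count i) i := by
      funext i
      rw [visFold_getD]
      simp [PySem.Dict.get?_empty]
    rw [hcntf]
    have hlen : (0:Int) + ((((([0,1,2,3,4,5,6,7,8] : List Int).flatMap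
          fun v => List.replicate (ds.count v) v).length : Int)) + (ds.count 9 : Int))
        = (ds.length : Int) := by
      have := length_buckets ds hb
      rw [flatMap_R10_split] at this
      simp only [List.length_append, List.length_replicate] at this
      omega
    have hsub : k - ds.sum = k - ds.sum - 0 := by ring
    rw [hsub, pvBLoop_eq ds k _ 0 0 (by decide) (by omega) hlen, flatMap_R10_split]
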